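-- pv_equiv track=rewrite | github.com/PrekshaK/Google-Foobar | Guard_game.py | answer
-- ===== SOURCE A (Python) =====
-- def answer(x):
--     list = []
--     sum = 0
--     for elements in str(x):
--         list.append(int(elements))
--     while len(list) != 1:
--         sum += list[0] + list[1]
--         if len(str(sum)) == 1:
--             list[0] = sum
--             list.remove(list[1])
--         else:
--             list[0] = int(str(sum)[0])
--             list[1] = int(str(sum)[1])
--         sum = 0
--     return list[0]
-- ===== SOURCE B (Python) =====
-- def answer(x):
--     digits = [int(c) for c in str(x)]
--     total = sum(digits)
--     return 0 if total == 0 else 1 + (total - 1) % 9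
-- ===== Notes on version B (the rewrite author's own statement) =====
-- stated objective: simpler
-- what changed: Replaced A's while-loop that repeatedly sums the first two digits and splits a two-digit carry back into the list by the digital-root closed form: parse the same digit list from str(x) and map their total through the mod-nine formula.
import Mathlib
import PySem

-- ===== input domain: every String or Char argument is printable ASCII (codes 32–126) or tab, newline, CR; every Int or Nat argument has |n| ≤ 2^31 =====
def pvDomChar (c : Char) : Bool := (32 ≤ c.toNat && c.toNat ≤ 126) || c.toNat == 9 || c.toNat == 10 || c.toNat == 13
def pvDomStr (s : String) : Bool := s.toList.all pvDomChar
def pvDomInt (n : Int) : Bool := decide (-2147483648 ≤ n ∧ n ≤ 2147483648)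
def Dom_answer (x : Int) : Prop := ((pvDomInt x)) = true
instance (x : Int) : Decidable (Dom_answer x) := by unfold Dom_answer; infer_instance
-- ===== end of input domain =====

-- B replaces A's one-pair-at-a-time carry-splitting while-loop by the digital-root
-- closed form 1 + (sum_of_digits - 1) % 9 computed from the same parsed digit list (simpler).

-- ===== PORT A =====

-- int(<one-character string>); the 0 default is unreachable for the digit characters
-- produced inside Pre_ (int('c') would raise ValueError in Python)
def pyIntOfChar (c : Char) : Int := (PySem.Int.ofStr? (String.ofList [c])).getD 0

-- the while-loop of A; `fuel` is a bound on the number of iterations (2*len+2 suffices,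
-- proved below), the fallbacks for fuel 0 / empty list are unreachable inside Pre_
def answerLoop : Nat → List Int → Int
  | _, [a] => a
  | fuel + 1, a :: b :: rest =>
      -- sum += list[0] + list[1]
      let s := a + b
      if PySem.Str.len (PySem.Int.toStr s) = 1 then
        -- list[0] = sum; list.remove(list[1])
        answerLoop fuel ((PySem.List.remove? (s :: b :: rest) b).getD [])
      else
        -- list[0] = int(str(sum)[0]); list[1] = int(str(sum)[1])
        answerLoop fuel
          (pyIntOfChar ((PySem.Str.pyGet? (PySem.Int.toStr s) 0).getD ' ')
            :: pyIntOfChar ((PySem.Str.pyGet? (PySem.Int.toStr s) 1).getD ' ') :: rest)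
  | 0, _ => 0
  | _, [] => 0

def answer (x : Int) : Int :=
  -- for elements in str(x): list.append(int(elements))
  let digits := (PySem.Int.toStr x).toList.foldl (fun acc c => acc ++ [pyIntOfChar c]) []
  answerLoop (2 * digits.length + 2) digits

-- ===== PORT B =====
def answer_alt (x : Int) : Int :=
  let digits := (PySem.Int.toStr x).toList.map pyIntOfChar
  let total := digits.sum
  if total = 0 then 0 else 1 + PySem.Int.mod (total - 1) 9

-- ===== PRECONDITION & SPEC =====
-- Pre_ excludes negative x, where str(x) starts with '-' and int('-') raises ValueError
-- in A (and in B alike).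
def Pre_answer (x : Int) : Prop := 0 ≤ x
instance (x : Int) : Decidable (Pre_answer x) := by unfold Pre_answer; infer_instance
def pvWitness_answer : Int := 1234

def Spec_answer (x : Int) (out : Int) : Prop := out = answer_alt x
instance (x : Int) (out : Int) : Decidable (Spec_answer x out) := by unfold Spec_answer; infer_instance

-- ===== CLAIM (what is proved, stated in full; the proofs are below) =====
def Claim_equal_answer : Prop := ∀ (x : Int), Dom_answer x → Pre_answer x → Spec_answer x (answer x)

-- ===== LEMMAS AND PROOFS =====

def digitChars : List Char := ['0','1','2','3','4','5','6','7','8','9']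

lemma mem_toDigitsCore (c : Char) : ∀ (fuel n : Nat) (ds : List Char),
    c ∈ Nat.toDigitsCore 10 fuel n ds → c ∈ ds ∨ c ∈ digitChars := by
  intro fuel
  induction fuel with
  | zero => intro n ds h; exact Or.inl h
  | succ fuel ih =>
    intro n ds h
    have hd : (n % 10).digitChar ∈ digitChars := by
      have h10 : n % 10 < 10 := Nat.mod_lt _ (by omega)
      set m := n % 10 with hm
      interval_cases m <;> decide
    rw [Nat.toDigitsCore] at h
    by_cases h0 : n / 10 = 0
    · simp only [h0, if_pos] at h
      rcases List.mem_cons.mp h with h | h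
      · exact Or.inr (h ▸ hd)
      · exact Or.inl h
    · simp only [h0, ite_false] at h
      rcases ih (n / 10) ((n % 10).digitChar :: ds) h with h' | h'
      · rcases List.mem_cons.mp h' with h'' | h''
        · exact Or.inr (h'' ▸ hd)
        · exact Or.inl h''
      · exact Or.inr h'

lemma toDigitsCore_ne_nil : ∀ (fuel n : Nat) (ds : List Char), 0 < fuel →
    Nat.toDigitsCore 10 fuel n ds ≠ [] := by
  intro fuel
  induction fuel with
  | zero => intro n ds h; omega
  | succ fuel ih =>
    intro n ds _
    rw [Nat.toDigitsCore]
    by_cases h0 : n / 10 = 0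
    · simp [h0]
    · simp only [h0, ite_false]
      rcases Nat.eq_zero_or_pos fuel with hf' | hf'
      · subst hf'; rw [Nat.toDigitsCore]; simp
      · exact ih _ _ hf'

lemma pyIntOfChar_digit {c : Char} (h : c ∈ digitChars) :
    0 ≤ pyIntOfChar c ∧ pyIntOfChar c ≤ 9 := by
  fin_cases h <;> exact ⟨by decide, by decide⟩

-- chars of str(x) for 0 ≤ x are decimal digits
lemma toStr_chars_digit {x : Int} (hx : 0 ≤ x) {c : Char}
    (hc : c ∈ (PySem.Int.toStr x).toList) : c ∈ digitChars := by
  rw [PySem.Int.toList_toStr] at hc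
  unfold PySem.Int.toChars at hc
  rw [if_neg (by omega)] at hc
  rcases mem_toDigitsCore c _ _ _ hc with h | h
  · simp at h
  · exact h

lemma toStr_toList_ne_nil (x : Int) : (PySem.Int.toStr x).toList ≠ [] := by
  rw [PySem.Int.toList_toStr]
  unfold PySem.Int.toChars
  by_cases hx : x < 0
  · simp [hx]
  · rw [if_neg hx]
    exact toDigitsCore_ne_nil _ _ _ (by omega)

-- str(s) facts on the finite range the loop meets
lemma lenStr_of_le_nine {s : Int} (h0 : 0 ≤ s) (h9 : s ≤ 9) :
    PySem.Str.len (PySem.Int.toStr s) = 1 := by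
  interval_cases s <;> decide

lemma lenStr_of_carry {s : Int} (h0 : 10 ≤ s) (h9 : s ≤ 18) :
    PySem.Str.len (PySem.Int.toStr s) ≠ 1 ∧
    pyIntOfChar ((PySem.Str.pyGet? (PySem.Int.toStr s) 0).getD ' ') = 1 ∧
    pyIntOfChar ((PySem.Str.pyGet? (PySem.Int.toStr s) 1).getD ' ') = s - 10 := by
  interval_cases s <;> exact ⟨by decide, by decide, by decide⟩

-- list.remove(list[1]) after list[0] = sum: the result is always s :: rest
-- (if s equals the old list[1] the FIRST occurrence, index 0, is removed instead,
-- but the resulting list is the same)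
lemma remove_head_pair (s b : Int) (rest : List Int) :
    (PySem.List.remove? (s :: b :: rest) b).getD [] = s :: rest := by
  unfold PySem.List.remove?
  by_cases hsb : s = b
  · subst hsb; simp [List.idxOf?_cons]
  · have : (s == b) = false := by simp [hsb]
    simp [List.idxOf?_cons, this]

-- the digital root closed form
def droot (t : Int) : Int := if t = 0 then 0 else 1 + (t - 1) % 9

lemma droot_sub_nine {t : Int} (h : 10 ≤ t) : droot (t - 9) = droot t := by
  unfold droot
  rw [if_neg (by omega), if_neg (by omega)]
  have h1 : t - 9 - 1 = t - 1 - 9 := by ring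
  rw [h1, Int.sub_emod_right]

lemma droot_digit {a : Int} (h0 : 0 ≤ a) (h9 : a ≤ 9) : droot a = a := by
  unfold droot
  by_cases ha : a = 0
  · simp [ha]
  · rw [if_neg ha, Int.emod_eq_of_lt (by omega) (by omega)]
    ring

-- iteration bound used as fuel
def phi : List Int → Nat
  | a :: b :: rest => 2 * rest.length + 4 + (if 10 ≤ a + b then 1 else 0)
  | l => 2 * l.length

lemma phi_le (l : List Int) : phi l ≤ 2 * l.length + 2 := by
  rcases l with _ | ⟨a, _ | ⟨b, t⟩⟩ <;> simp only [phi, List.length_cons, List.length_nil] <;> [omega; omega; (split_ifs <;> omega)]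

-- the loop computes the digital root of the digit sum
lemma answerLoop_eq_droot (fuel : Nat) (l : List Int)
    (hd : ∀ d ∈ l, 0 ≤ d ∧ d ≤ 9) (hne : l ≠ []) (hf : phi l ≤ fuel) :
    answerLoop fuel l = droot l.sum := by
  induction fuel generalizing l with
  | zero =>
    exfalso
    rcases l with _ | ⟨a, _ | ⟨b, t⟩⟩
    · exact hne rfl
    · simp [phi] at hf
    · simp [phi] at hf
  | succ fuel ih =>
    match l, hne with
    | [a], _ =>
      have h := hd a (by simp)
      show a = droot [a].sum
      simpa using (droot_digit h.1 h.2).symm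
    | a :: b :: rest, _ =>
      have ha := hd a (by simp)
      have hb := hd b (by simp)
      have hs0 : 0 ≤ a + b := by omega
      have hs18 : a + b ≤ 18 := by omega
      have hrest : ∀ d ∈ rest, 0 ≤ d ∧ d ≤ 9 := fun d hdm => hd d (by simp [hdm])
      have hrestnn : 0 ≤ rest.sum := List.sum_nonneg (fun d hdm => (hrest d hdm).1)
      by_cases hcar : a + b ≤ 9
      · -- single-digit sum: merge the pair
        have hlen := lenStr_of_le_nine hs0 hcar
        have hstep : answerLoop (fuel + 1) (a :: b :: rest)
            = answerLoop fuel ((a + b) :: rest) := by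
          rw [answerLoop, if_pos hlen, remove_head_pair]
        have hfuel' : phi ((a + b) :: rest) ≤ fuel := by
          rcases rest with _ | ⟨c, t⟩ <;>
            simp only [phi, List.length_cons, List.length_nil] at hf ⊢ <;>
            split_ifs at hf ⊢ <;> omega
        rw [hstep, ih ((a + b) :: rest)
            (by intro d hdm
                rcases List.mem_cons.mp hdm with h | h
                · exact h ▸ ⟨hs0, hcar⟩
                · exact hrest d h)
            (by simp) hfuel']
        have h2 : ((a + b) :: rest).sum = (a :: b :: rest).sum := by
          simp only [List.sum_cons]; ring
        rw [h2]
      · -- two-digit sum: split the carry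
        obtain ⟨hlen, hc0, hc1⟩ := lenStr_of_carry (by omega) hs18
        have hstep : answerLoop (fuel + 1) (a :: b :: rest)
            = answerLoop fuel (1 :: (a + b - 10) :: rest) := by
          rw [answerLoop, if_neg hlen, hc0, hc1]
        have hfuel' : phi (1 :: (a + b - 10) :: rest) ≤ fuel := by
          simp only [phi] at hf ⊢
          rw [if_pos (by omega : (10:Int) ≤ a + b)] at hf
          rw [if_neg (by omega : ¬ (10:Int) ≤ 1 + (a + b - 10))]
          omega
        rw [hstep, ih (1 :: (a + b - 10) :: rest)
            (by intro d hdm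
                rcases List.mem_cons.mp hdm with h | h
                · exact h ▸ ⟨by omega, by omega⟩
                rcases List.mem_cons.mp h with h' | h'
                · exact h' ▸ ⟨by omega, by omega⟩
                · exact hrest d h')
            (by simp) hfuel']
        have hsum : (1 :: (a + b - 10) :: rest).sum = (a :: b :: rest).sum - 9 := by
          simp only [List.sum_cons]; ring
        have h10 : (10:Int) ≤ (a :: b :: rest).sum := by
          simp only [List.sum_cons]; omega
        rw [hsum, droot_sub_nine h10]

-- A's append-fold builds the same digit list as B's map
lemma foldl_append_eq_map_pyIntOfChar (cs : List Char) :
    cs.foldl (fun acc c => acc ++ [pyIntOfChar c]) [] = cs.map pyIntOfChar := by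
  simpa using PySem.List.foldl_append_singleton_eq_map pyIntOfChar cs []

-- ===== VERDICT (by name: the statement is the Claim_ definition above) =====
theorem answer_spec : Claim_equal_answer := by
  intro x hdom hpre
  unfold Spec_answer answer answer_alt
  rw [foldl_append_eq_map_pyIntOfChar]
  set digits := (PySem.Int.toStr x).toList.map pyIntOfChar with hdig
  have hd : ∀ d ∈ digits, 0 ≤ d ∧ d ≤ 9 := by
    intro d hdm
    rcases List.mem_map.mp hdm with ⟨c, hc, rfl⟩
    exact pyIntOfChar_digit (toStr_chars_digit hpre hc)
  have hne : digits ≠ [] := by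
    rw [hdig]
    intro h
    exact toStr_toList_ne_nil x (List.map_eq_nil_iff.mp h)
  have hfuel : phi digits ≤ 2 * digits.length + 2 := phi_le digits
  rw [answerLoop_eq_droot _ _ hd hne hfuel]
  unfold droot
  by_cases h0 : digits.sum = 0
  · simp [h0]
  · rw [if_neg h0, if_neg h0, PySem.Int.mod_eq_emod_of_pos (by omega : (0:Int) < 9)]
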